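-- pv_equiv track=rewrite | github.com/Solpo/advent_of_code | 11/ihmiset2.py | vasemmalla
-- ===== SOURCE A (Python) =====
-- def sisalla(y: int, x: int, matriisi: list) -> bool:
--     return True if y >= 0 and y < len(matriisi) and x >= 0 and x < len(matriisi[y]) else False
--
-- def vasemmalla(y, x, matriisi) -> int:
--     x -= 1
--     while sisalla(y, x, matriisi):
--         if matriisi[y][x] == "L":
--             return 0
--         if matriisi[y][x] == "#":
--             return 1
--         x -= 1
--     return 0
-- ===== SOURCE B (Python) =====
-- def vasemmalla(y, x, matriisi) -> int:
--     # single forward pass over the prefix, remembering the last seat seen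
--     if not (0 <= y < len(matriisi)):
--         return 0
--     row = matriisi[y]
--     if x < 1 or x - 1 >= len(row):
--         return 0
--     last = ""
--     for c in row[:x]:
--         if c == "L" or c == "#":
--             last = c
--     return 1 if last == "#" else 0
-- ===== Notes on version B (the rewrite author's own statement) =====
-- stated objective: alternative
-- what changed: Replaces A's backward while-loop with early returns by boundary guards plus one forward fold over the row prefix that remembers the last seat seen, then compares it to '#'.
import Mathlib
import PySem

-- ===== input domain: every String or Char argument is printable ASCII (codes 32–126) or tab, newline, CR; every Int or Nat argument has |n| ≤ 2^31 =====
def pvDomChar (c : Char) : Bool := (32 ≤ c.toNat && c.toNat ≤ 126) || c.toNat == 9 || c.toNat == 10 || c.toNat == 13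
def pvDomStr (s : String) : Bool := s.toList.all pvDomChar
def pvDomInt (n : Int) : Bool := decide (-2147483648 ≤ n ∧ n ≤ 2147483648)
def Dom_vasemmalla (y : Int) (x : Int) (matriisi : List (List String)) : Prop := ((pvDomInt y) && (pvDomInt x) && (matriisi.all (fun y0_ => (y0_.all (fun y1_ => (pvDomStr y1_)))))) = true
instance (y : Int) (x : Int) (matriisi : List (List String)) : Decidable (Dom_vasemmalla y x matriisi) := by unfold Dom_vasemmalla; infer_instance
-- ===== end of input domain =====

-- B replaces A's backward scan (early return at the first seat) with boundary
-- guards plus one forward fold remembering the last seat seen in the prefix.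

-- ===== PORT A =====
def sisalla (y : Int) (x : Int) (matriisi : List (List String)) : Bool :=
  decide (0 ≤ y) && decide (y < (matriisi.length : Int)) && decide (0 ≤ x) &&
    decide (x < ((PySem.List.pyGet? matriisi y).getD [] |>.length : Int))

-- the 'while sisalla' loop of A, stepping x downwards; x < 0 stops it, whence the measure
def vasLoopA (y : Int) (matriisi : List (List String)) (x : Int) : Int :=
  if h : sisalla y x matriisi = true then
    let c := ((PySem.List.pyGet? ((PySem.List.pyGet? matriisi y).getD []) x).getD "")
    if c = "L" then 0
    else if c = "#" then 1
    else vasLoopA y matriisi (x - 1)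
  else 0
termination_by (x + 1).toNat
decreasing_by
  simp only [sisalla, Bool.and_eq_true, decide_eq_true_eq] at h
  omega

def vasemmalla (y : Int) (x : Int) (matriisi : List (List String)) : Int :=
  vasLoopA y matriisi (x - 1)

-- ===== PORT B =====
def vasemmalla_alt (y : Int) (x : Int) (matriisi : List (List String)) : Int :=
  if 0 ≤ y ∧ y < (matriisi.length : Int) then
    let row := (PySem.List.pyGet? matriisi y).getD []
    if x < 1 ∨ (row.length : Int) ≤ x - 1 then 0
    else
      -- row[:x] with 0 ≤ x is row.take x.toNat (PySem.List.slice_to)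
      let last := (row.take x.toNat).foldl (fun acc c => if c = "L" ∨ c = "#" then c else acc) ""
      if last = "#" then 1 else 0
  else 0

-- ===== PRECONDITION & SPEC =====
def Spec_vasemmalla (y : Int) (x : Int) (matriisi : List (List String)) (out : Int) : Prop := out = vasemmalla_alt y x matriisi
instance (y : Int) (x : Int) (matriisi : List (List String)) (out : Int) : Decidable (Spec_vasemmalla y x matriisi out) := by unfold Spec_vasemmalla; infer_instance

-- ===== CLAIM (what is proved, stated in full; the proofs are below) =====
def Claim_equal_vasemmalla : Prop := ∀ (y : Int) (x : Int) (matriisi : List (List String)), Dom_vasemmalla y x matriisi → Spec_vasemmalla y x matriisi (vasemmalla y x matriisi)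

-- ===== LEMMAS AND PROOFS =====

def lastSeat (l : List String) : String :=
  l.foldl (fun acc c => if c = "L" ∨ c = "#" then c else acc) ""

theorem lastSeat_append (l : List String) (c : String) :
    lastSeat (l ++ [c]) = if c = "L" ∨ c = "#" then c else lastSeat l := by
  simp [lastSeat]

theorem vasLoopA_of_invalid_y (y : Int) (m : List (List String)) (x : Int)
    (hy : ¬ (0 ≤ y ∧ y < (m.length : Int))) : vasLoopA y m x = 0 := by
  rw [vasLoopA]
  simp only [sisalla, Bool.and_eq_true, decide_eq_true_eq]
  rw [dif_neg (by tauto)]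

theorem vasLoopA_eq_lastSeat (y : Int) (m : List (List String))
    (hy : 0 ≤ y ∧ y < (m.length : Int))
    (row : List String) (hrow : (PySem.List.pyGet? m y).getD [] = row)
    (k : Nat) (hk : k ≤ row.length) :
    vasLoopA y m ((k : Int) - 1) = if lastSeat (row.take k) = "#" then 1 else 0 := by
  induction k with
  | zero =>
      rw [vasLoopA]
      simp only [sisalla, Bool.and_eq_true, decide_eq_true_eq]
      rw [dif_neg (by omega)]
      simp [lastSeat]
  | succ n ih =>
      have hn : n < row.length := by omega
      have harg : ((n + 1 : Nat) : Int) - 1 = ((n : Nat) : Int) := by push_cast; ring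
      rw [harg, vasLoopA]
      have hs : sisalla y ((n : Nat) : Int) m = true := by
        simp only [sisalla, Bool.and_eq_true, decide_eq_true_eq, hrow]
        refine ⟨⟨⟨hy.1, hy.2⟩, by omega⟩, by exact_mod_cast hn⟩
      rw [dif_pos hs]
      have hc : ((PySem.List.pyGet? ((PySem.List.pyGet? m y).getD []) ((n : Nat) : Int)).getD "") = row[n] := by
        rw [hrow, PySem.List.pyGet?_natCast]
        simp [List.getElem?_eq_getElem hn]
      have htake : row.take (n + 1) = row.take n ++ [row[n]] := by
        rw [List.take_add_one, List.getElem?_eq_getElem hn]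
        rfl
      rw [htake, lastSeat_append]
      simp only [hc]
      by_cases hL : row[n] = "L"
      · simp [hL]
      · by_cases hH : row[n] = "#"
        · simp [hH]
        · simp only [hL, hH, or_self, if_false]
          exact ih (by omega)

-- ===== VERDICT (by name: the statement is the Claim_ definition above) =====
theorem vasemmalla_spec : Claim_equal_vasemmalla := by
  intro y x m _
  unfold Spec_vasemmalla vasemmalla vasemmalla_alt
  by_cases hy : 0 ≤ y ∧ y < (m.length : Int)
  · rw [if_pos hy]
    set row : List String := (PySem.List.pyGet? m y).getD [] with hrow
    by_cases hx : x < 1 ∨ (row.length : Int) ≤ x - 1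
    · rw [if_pos hx]
      rw [vasLoopA]
      simp only [sisalla, Bool.and_eq_true, decide_eq_true_eq]
      rw [dif_neg (by rw [← hrow]; omega)]
    · rw [if_neg hx]
      push Not at hx
      have hx1 : 1 ≤ x := by omega
      have hxk : x = ((x.toNat : Nat) : Int) := by omega
      have := vasLoopA_eq_lastSeat y m hy row hrow.symm x.toNat (by omega)
      rw [hxk]
      rw [this]
      rfl
  · rw [if_neg hy]
    exact vasLoopA_of_invalid_y y m (x - 1) hy
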